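-- pv_equiv track=rewrite | github.com/anirudh-r5/535-Proj1 | alg3.py | find_starting_city
-- ===== SOURCE A (Python) =====
-- def find_starting_city(distances, fuel, mpg):
--     n = len(fuel)  # Number of cities
--     current_fuel = 0  # To track fuel as we move through cities
--     starting_city = 0  # Index of the potential starting city
--
--     for i in range(n):
--         fuel_gain = fuel[i] * mpg  # Gas from city i converted to miles we can travel
--         fuel_required = distances[i]  # Miles required to travel to the next city
--         current_fuel += fuel_gain - fuel_required  # Update the current fuel balance
--
--         # If we run out of fuel, reset the starting point
--         if current_fuel < 0:
--             starting_city = i + 1  # Set the next city as the new potential starting point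
--             current_fuel = 0  # Reset the current fuel
--
--     return starting_city  # Return the valid starting city
-- ===== SOURCE B (Python) =====
-- def find_starting_city(distances, fuel, mpg):
--     # Build the table of cumulative fuel balances after each city, then
--     # return one past the first position of the minimum balance (0 if the
--     # minimum is non-negative).
--     prefix = []
--     total = 0
--     for i in range(len(fuel)):
--         total += fuel[i] * mpg - distances[i]
--         prefix.append(total)
--     if not prefix:
--         return 0
--     m = min(prefix)
--     if m < 0:
--         return prefix.index(m) + 1
--     return 0
-- ===== Notes on version B (the rewrite author's own statement) =====
-- stated objective: alternative
-- what changed: Replaces the greedy running-balance loop with resets by a build-the-prefix-balance-table pass followed by a separate first-argmin scan (min + index), returning first-argmin+1 when the minimum balance is negative, else 0.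
import Mathlib
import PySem

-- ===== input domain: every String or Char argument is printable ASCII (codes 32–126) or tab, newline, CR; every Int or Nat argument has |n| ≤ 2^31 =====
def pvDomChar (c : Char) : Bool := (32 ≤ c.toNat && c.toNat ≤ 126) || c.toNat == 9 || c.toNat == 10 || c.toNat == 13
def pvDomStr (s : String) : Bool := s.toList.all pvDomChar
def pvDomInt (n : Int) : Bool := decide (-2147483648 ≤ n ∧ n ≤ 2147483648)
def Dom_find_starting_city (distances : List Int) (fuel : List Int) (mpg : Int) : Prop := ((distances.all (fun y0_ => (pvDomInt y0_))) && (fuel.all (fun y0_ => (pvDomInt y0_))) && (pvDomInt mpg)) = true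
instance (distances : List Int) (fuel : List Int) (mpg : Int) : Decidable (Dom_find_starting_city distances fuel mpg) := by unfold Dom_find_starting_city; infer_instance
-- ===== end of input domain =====

-- B replaces A's greedy reset loop by a prefix-balance table plus a separate first-argmin scan (alternative decomposition, same O(n) cost).

-- ===== PORT A =====
-- the body of A's for-loop (state = (current_fuel, starting_city))
def pvStepA (distances : List Int) (fuel : List Int) (mpg : Int) (st : Int × Int) (i : Int) : Int × Int :=
  let fuel_gain := PySem.List.pyGetD fuel i 0 * mpg
  let fuel_required := PySem.List.pyGetD distances i 0
  let current_fuel := st.1 + fuel_gain - fuel_required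
  if current_fuel < 0 then (0, i + 1) else (current_fuel, st.2)

def find_starting_city (distances : List Int) (fuel : List Int) (mpg : Int) : Int :=
  let n : Int := fuel.length
  ((PySem.List.pyRange 0 n 1).foldl (pvStepA distances fuel mpg) (0, 0)).2

-- ===== PORT B =====
-- the body of B's table-building loop (state = (total, prefix))
def pvStepB (distances : List Int) (fuel : List Int) (mpg : Int) (st : Int × List Int) (i : Int) : Int × List Int :=
  let total := st.1 + PySem.List.pyGetD fuel i 0 * mpg - PySem.List.pyGetD distances i 0
  (total, st.2 ++ [total])

def find_starting_city_alt (distances : List Int) (fuel : List Int) (mpg : Int) : Int :=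
  let pre := ((PySem.List.pyRange 0 (fuel.length : Int) 1).foldl (pvStepB distances fuel mpg) (0, [])).2
  match PySem.List.min? pre (fun x => x) with
  | none => 0
  | some m => if m < 0 then (((PySem.List.index? pre m).getD 0 : Nat) : Int) + 1 else 0

-- ===== PRECONDITION & SPEC =====
-- Pre_ excludes exactly the inputs where Python A raises IndexError: fewer distances than fuel entries.
def Pre_find_starting_city (distances : List Int) (fuel : List Int) (mpg : Int) : Prop :=
  fuel.length ≤ distances.length
instance (distances : List Int) (fuel : List Int) (mpg : Int) : Decidable (Pre_find_starting_city distances fuel mpg) := by unfold Pre_find_starting_city; infer_instance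

def pvWitness_find_starting_city : List Int × List Int × Int := ([2, 3, 1], [1, 2, 1], 2)

def Spec_find_starting_city (distances : List Int) (fuel : List Int) (mpg : Int) (out : Int) : Prop := out = find_starting_city_alt distances fuel mpg
instance (distances : List Int) (fuel : List Int) (mpg : Int) (out : Int) : Decidable (Spec_find_starting_city distances fuel mpg out) := by unfold Spec_find_starting_city; infer_instance

-- ===== CLAIM (what is proved, stated in full; the proofs are below) =====
def Claim_equal_find_starting_city : Prop := ∀ (distances : List Int) (fuel : List Int) (mpg : Int), Dom_find_starting_city distances fuel mpg → Pre_find_starting_city distances fuel mpg → Spec_find_starting_city distances fuel mpg (find_starting_city distances fuel mpg)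

-- ===== LEMMAS AND PROOFS =====

-- pulling a min out of a fold
theorem pv_foldl_min_pull (t : List Int) : ∀ a b : Int, t.foldl min (min a b) = min a (t.foldl min b) := by
  induction t with
  | nil => intro a b; rfl
  | cons c t ih =>
      intro a b
      simp only [List.foldl]
      rw [min_assoc, ih]

-- Invariant relating A's greedy state with B's prefix table after k steps:
-- with sA/sB the two loop states and M the running min of 0 and B's table,
-- the table has length k, A's fuel is sB.1 - M, M bounds the table below, M ≤ 0,
-- and A's starting_city is 0 if M = 0, else first-index-of-M + 1.
theorem pv_inv (distances fuel : List Int) (mpg : Int) (k : Nat) :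
    (((PySem.List.pyRange 0 (k : Int) 1).foldl (pvStepB distances fuel mpg) (0, [])).2.length = k) ∧
    (((PySem.List.pyRange 0 (k : Int) 1).foldl (pvStepA distances fuel mpg) (0, 0)).1
      = ((PySem.List.pyRange 0 (k : Int) 1).foldl (pvStepB distances fuel mpg) (0, [])).1
        - (((PySem.List.pyRange 0 (k : Int) 1).foldl (pvStepB distances fuel mpg) (0, [])).2.foldl min 0)) ∧
    (∀ x ∈ ((PySem.List.pyRange 0 (k : Int) 1).foldl (pvStepB distances fuel mpg) (0, [])).2,
        (((PySem.List.pyRange 0 (k : Int) 1).foldl (pvStepB distances fuel mpg) (0, [])).2.foldl min 0) ≤ x) ∧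
    ((((PySem.List.pyRange 0 (k : Int) 1).foldl (pvStepB distances fuel mpg) (0, [])).2.foldl min 0) ≤ 0) ∧
    ((((PySem.List.pyRange 0 (k : Int) 1).foldl (pvStepB distances fuel mpg) (0, [])).2.foldl min 0) = 0
       → ((PySem.List.pyRange 0 (k : Int) 1).foldl (pvStepA distances fuel mpg) (0, 0)).2 = 0) ∧
    ((((PySem.List.pyRange 0 (k : Int) 1).foldl (pvStepB distances fuel mpg) (0, [])).2.foldl min 0) < 0
       → ((((PySem.List.pyRange 0 (k : Int) 1).foldl (pvStepB distances fuel mpg) (0, [])).2.foldl min 0)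
             ∈ ((PySem.List.pyRange 0 (k : Int) 1).foldl (pvStepB distances fuel mpg) (0, [])).2
          ∧ ((PySem.List.pyRange 0 (k : Int) 1).foldl (pvStepA distances fuel mpg) (0, 0)).2
             = (((PySem.List.index?
                   ((PySem.List.pyRange 0 (k : Int) 1).foldl (pvStepB distances fuel mpg) (0, [])).2
                   (((PySem.List.pyRange 0 (k : Int) 1).foldl (pvStepB distances fuel mpg) (0, [])).2.foldl min 0)).getD 0 : Nat) : Int) + 1)) := by
  induction k with
  | zero =>
      simp [PySem.List.pyRange_one_eq_nil (le_refl (0 : Int))]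
  | succ k ih =>
      obtain ⟨hlen, hc, hlb, hM0, hz, hneg⟩ := ih
      have hcast : ((k + 1 : Nat) : Int) = (k : Int) + 1 := by push_cast; ring
      rw [hcast, PySem.List.pyRange_one_succ_right (by positivity), List.foldl_append, List.foldl_append]
      simp only [List.foldl_cons, List.foldl_nil]
      set sA := (PySem.List.pyRange 0 (k : Int) 1).foldl (pvStepA distances fuel mpg) (0, 0) with hsA
      set sB := (PySem.List.pyRange 0 (k : Int) 1).foldl (pvStepB distances fuel mpg) (0, ([] : List Int)) with hsB
      set M := sB.2.foldl min 0 with hM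
      set d := PySem.List.pyGetD fuel (k : Int) 0 * mpg - PySem.List.pyGetD distances (k : Int) 0 with hd
      have hBstep : pvStepB distances fuel mpg sB (k : Int) = (sB.1 + d, sB.2 ++ [sB.1 + d]) := by
        simp [pvStepB, hd]; ring_nf
      set t := sB.1 + d with ht
      have hcond : sA.1 + PySem.List.pyGetD fuel (k : Int) 0 * mpg - PySem.List.pyGetD distances (k : Int) 0 = t - M := by
        rw [ht, hd, hc]; ring
      have hAstep : pvStepA distances fuel mpg sA (k : Int)
          = if t - M < 0 then (0, (k : Int) + 1) else (t - M, sA.2) := by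
        simp only [pvStepA]
        rw [hcond]
      have hminapp : (sB.2 ++ [t]).foldl min 0 = min M t := by
        rw [List.foldl_append]; rfl
      rw [hBstep, hAstep]
      by_cases hlt : t - M < 0
      · -- reset: t is a strictly new minimum
        have htM : t < M := by omega
        have hmin : min M t = t := by omega
        have hnotmem : t ∉ sB.2 := by
          intro hmem
          exact absurd (hlb t hmem) (by omega)
        simp only [if_pos hlt]
        refine ⟨by simp [hlen], ?_, ?_, ?_, ?_, ?_⟩
        · simp [hminapp, hmin]
        · intro x hx
          rw [hminapp, hmin]
          rcases List.mem_append.mp hx with h | h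
          · exact le_of_lt (lt_of_lt_of_le htM (hlb x h))
          · simp at h; omega
        · rw [hminapp, hmin]; omega
        · rw [hminapp, hmin]; intro h0; omega
        · intro _
          rw [hminapp, hmin]
          constructor
          · exact List.mem_append.mpr (Or.inr (by simp))
          · rw [PySem.List.index?_append_singleton_self sB.2 t hnotmem]
            simp [hlen]
      · -- no reset: the minimum is unchanged
        have hMt : M ≤ t := by omega
        have hmin : min M t = M := by omega
        simp only [if_neg hlt]
        refine ⟨by simp [hlen], ?_, ?_, ?_, ?_, ?_⟩
        · simp [hminapp, hmin]
        · intro x hx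
          rw [hminapp, hmin]
          rcases List.mem_append.mp hx with h | h
          · exact hlb x h
          · simp at h; omega
        · rw [hminapp, hmin]; exact hM0
        · rw [hminapp, hmin]; exact hz
        · intro hMneg
          rw [hminapp, hmin] at *
          obtain ⟨hmem, hidx⟩ := hneg hMneg
          refine ⟨List.mem_append.mpr (Or.inl hmem), ?_⟩
          rw [PySem.List.index?_append_of_mem [t] hmem]
          exact hidx

-- ===== VERDICT (by name: the statement is the Claim_ definition above) =====
theorem find_starting_city_spec : Claim_equal_find_starting_city := by
  intro distances fuel mpg _ _
  obtain ⟨hlen, hc, hlb, hM0, hz, hneg⟩ := pv_inv distances fuel mpg fuel.length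
  set sA := (PySem.List.pyRange 0 (fuel.length : Int) 1).foldl (pvStepA distances fuel mpg) (0, 0) with hsA
  set L := ((PySem.List.pyRange 0 (fuel.length : Int) 1).foldl (pvStepB distances fuel mpg) (0, ([] : List Int))).2 with hL
  set M := L.foldl min 0 with hM
  have hB : find_starting_city_alt distances fuel mpg
      = match PySem.List.min? L (fun x => x) with
        | none => 0
        | some m => if m < 0 then (((PySem.List.index? L m).getD 0 : Nat) : Int) + 1 else 0 := rfl
  show find_starting_city distances fuel mpg = find_starting_city_alt distances fuel mpg
  have hA : find_starting_city distances fuel mpg = sA.2 := rfl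
  rw [hA, hB]
  cases hLc : L with
  | nil =>
      rw [hLc] at hM
      simp only [PySem.List.min?]
      exact hz (by simpa using hM)
  | cons x tl =>
      rw [PySem.List.min?_id_cons]
      show sA.2 = if tl.foldl min x < 0 then (((PySem.List.index? (x :: tl) (tl.foldl min x)).getD 0 : Nat) : Int) + 1 else 0
      rw [hLc] at hM
      set m := tl.foldl min x with hm
      have hMm : M = min 0 m := by
        rw [hM]
        show (tl.foldl min (min 0 x)) = min 0 (tl.foldl min x)
        exact pv_foldl_min_pull tl 0 x
      by_cases hmneg : m < 0
      · have hMeq : M = m := by rw [hMm]; omega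
        obtain ⟨_, hidx⟩ := hneg (by omega)
        rw [hLc] at hidx
        simp only [if_pos hmneg]
        rw [← hMeq]
        exact hidx
      · have hMeq : M = 0 := by rw [hMm]; omega
        simp only [if_neg hmneg]
        exact hz hMeq
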